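-- pv_equiv track=rewrite | github.com/MRU-W23-CS1/sample-code | lecture17/sarcastic_text.py | to_sarcastic
-- ===== SOURCE A (Python) =====
-- def to_sarcastic(txt: str) -> str:
--     """
--     Converts regular text into sarcastic text
--     """
--     sarcastic = ""
--     for i in range(0, len(txt)):
--         if i % 2 == 0:
--             sarcastic += txt[i].lower()
--         else:
--             sarcastic += txt[i].upper()
--
--     return sarcastic
-- ===== SOURCE B (Python) =====
-- def to_sarcastic(txt: str) -> str:
--     """
--     Converts regular text into sarcastic text
--     """
--     evens = [c.lower() for c in txt[::2]]
--     odds = [c.upper() for c in txt[1::2]]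
--     pairs = [lo + up for lo, up in zip(evens, odds)]
--     tail = evens[len(odds):]
--     return "".join(pairs) + "".join(tail)
-- ===== Notes on version B (the rewrite author's own statement) =====
-- stated objective: alternative
-- what changed: Replaces the indexed character-by-character loop with a parity test and repeated string concatenation by two per-character comprehensions over the even and odd stride-2 slices, zipped back together and joined once.
import Mathlib
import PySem

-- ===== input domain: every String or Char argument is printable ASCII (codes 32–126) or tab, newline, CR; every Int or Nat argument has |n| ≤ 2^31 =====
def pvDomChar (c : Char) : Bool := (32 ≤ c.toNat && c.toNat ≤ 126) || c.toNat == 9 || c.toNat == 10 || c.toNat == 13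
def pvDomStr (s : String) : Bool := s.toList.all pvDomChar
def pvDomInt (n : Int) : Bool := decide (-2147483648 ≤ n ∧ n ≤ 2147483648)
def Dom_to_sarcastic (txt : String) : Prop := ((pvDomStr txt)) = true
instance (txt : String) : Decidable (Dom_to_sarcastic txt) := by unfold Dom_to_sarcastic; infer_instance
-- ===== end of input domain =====

-- B replaces A's indexed loop with a parity test by per-character transforms of the two
-- stride-2 slices, zipped back together and joined once (alternative decomposition).


-- ===== PORT A =====
-- for i in range(0, len(txt)): append txt[i].lower() if i % 2 == 0 else txt[i].upper()
def to_sarcastic (txt : String) : String :=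
  let l := txt.toList
  let sarcastic :=
    (PySem.List.pyRange 0 (PySem.Chars.len l) 1).foldl
      (fun acc i =>
        if PySem.Int.mod i 2 = 0 then
          acc ++ PySem.Chars.lower [PySem.List.pyGetD l i ' ']
        else
          acc ++ PySem.Chars.upper [PySem.List.pyGetD l i ' '])
      []
  String.ofList sarcastic

-- ===== PORT B =====
-- evens = [c.lower() for c in txt[::2]]; odds = [c.upper() for c in txt[1::2]];
-- pairs = [lo + up for lo, up in zip(evens, odds)]; tail = evens[len(odds):]
def to_sarcastic_alt (txt : String) : String :=
  let l := txt.toList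
  let evens := ((PySem.List.slice? l none none 2).getD []).map PySem.Chars.lowerChar
  let odds := ((PySem.List.slice? l (some 1) none 2).getD []).map PySem.Chars.upperChar
  let pairs := (evens.zip odds).map (fun p => [p.1, p.2])
  String.ofList (pairs.flatten ++ evens.drop odds.length)

-- ===== PRECONDITION & SPEC =====
def Spec_to_sarcastic (txt : String) (out : String) : Prop := out = to_sarcastic_alt txt
instance (txt : String) (out : String) : Decidable (Spec_to_sarcastic txt out) := by unfold Spec_to_sarcastic; infer_instance

-- ===== CLAIM (what is proved, stated in full; the proofs are below) =====
def Claim_equal_to_sarcastic : Prop := ∀ (txt : String), Dom_to_sarcastic txt → Spec_to_sarcastic txt (to_sarcastic txt)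

-- ===== LEMMAS AND PROOFS =====
def evL {α : Type} : List α → List α
  | [] => []
  | [a] => [a]
  | a :: _ :: t => a :: evL t

theorem filterMap_two_step {α : Type} (l : List α) :
    (List.range ((l.length + 1) / 2)).filterMap (fun (k : Nat) => l[(2 * (k : Int)).toNat]?) = evL l := by
  match l with
  | [] => simp [evL]
  | [a] => simp [evL, List.range_succ]
  | a :: b :: t =>
    have hlen : ((a :: b :: t).length + 1) / 2 = (t.length + 1) / 2 + 1 := by
      simp; omega
    rw [hlen, List.range_succ_eq_map, List.filterMap_cons, List.filterMap_map]
    have h0 : ((a :: b :: t))[(2 * ((0:Nat) : Int)).toNat]? = some a := by simp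
    rw [h0]
    have hstep : ∀ k : Nat, ((a :: b :: t))[(2 * (((k+1) : Nat) : Int)).toNat]? = t[(2 * (k : Int)).toNat]? := by
      intro k
      have h1 : (2 * (((k+1) : Nat) : Int)).toNat = 2 * k + 2 := by omega
      have h2 : (2 * ((k : Nat) : Int)).toNat = 2 * k := by omega
      rw [h1, h2]
      simp
    simp only [Function.comp_def, hstep]
    rw [filterMap_two_step t]
    simp [evL]

theorem slice?_even {α : Type} (l : List α) :
    PySem.List.slice? l none none 2 = some (evL l) := by
  have hm : (if 0 < l.length then (((l.length : Int) + 2 - 1) / 2).toNat else 0) = (l.length + 1) / 2 := by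
    split <;> omega
  simp [PySem.List.slice?, PySem.List.sliceIndices, hm]
  rw [← filterMap_two_step l]

theorem slice?_odd {α : Type} (l : List α) :
    PySem.List.slice? l (some 1) none 2 = some (evL l.tail) := by
  match l with
  | [] => simp [PySem.List.slice?, PySem.List.sliceIndices, evL]
  | a :: t =>
    simp [PySem.List.slice?, PySem.List.sliceIndices]
    rw [show (if 0 < t.length then (((t.length : Int) + 2 - 1) / 2).toNat else 0) = (t.length + 1) / 2 from by split <;> omega]
    rw [← filterMap_two_step t]
    apply List.filterMap_congr
    intro k _
    have h1 : ((1 : Int) + 2 * (k : Nat)).toNat = 2 * k + 1 := by omega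
    have h2 : (2 * ((k : Nat) : Int)).toNat = 2 * k := by omega
    rw [h1, h2]
    simp

theorem evL_cons {α : Type} (a : α) (t : List α) : evL (a :: t) = a :: evL t.tail := by
  cases t <;> simp [evL]

def sarcSpec : List Char → List Char
  | [] => []
  | [c] => [PySem.Chars.lowerChar c]
  | c :: d :: rest => PySem.Chars.lowerChar c :: PySem.Chars.upperChar d :: sarcSpec rest

theorem interleave_eq (l : List Char) :
    ((((evL l).map PySem.Chars.lowerChar).zip ((evL l.tail).map PySem.Chars.upperChar)).map
        (fun p => [p.1, p.2])).flatten ++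
      ((evL l).map PySem.Chars.lowerChar).drop ((evL l.tail).map PySem.Chars.upperChar).length =
    sarcSpec l := by
  match l with
  | [] => simp [evL, sarcSpec]
  | [a] => simp [evL, sarcSpec]
  | a :: b :: t =>
    have h1 : evL (a :: b :: t) = a :: evL t := by simp [evL]
    have h2 : evL (a :: b :: t).tail = b :: evL t.tail := by
      simpa using evL_cons b t
    rw [h1, h2]
    simp only [List.map_cons, List.zip_cons_cons, List.flatten, List.length_cons, List.drop_succ_cons]
    have := interleave_eq t
    simp only [sarcSpec, List.append_eq, List.cons_append, List.nil_append]
    rw [this]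

theorem chars_lower_single (c : Char) : PySem.Chars.lower [c] = [PySem.Chars.lowerChar c] := by
  simp [PySem.Chars.lower]
theorem chars_upper_single (c : Char) : PySem.Chars.upper [c] = [PySem.Chars.upperChar c] := by
  simp [PySem.Chars.upper]

theorem a_flat (t : List Char) : ∀ (l : List Char) (a : Nat) (acc0 : List Char), l.drop a = t → a % 2 = 0 →
    (PySem.List.pyRange (a : Int) ((l.length : Int)) 1).foldl
      (fun acc i =>
        if PySem.Int.mod i 2 = 0 then
          acc ++ PySem.Chars.lower [PySem.List.pyGetD l i ' ']
        else
          acc ++ PySem.Chars.upper [PySem.List.pyGetD l i ' '])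
      acc0 = acc0 ++ sarcSpec t := by
  match t with
  | [] =>
    intro l a acc0 hdrop _
    have hle : l.length ≤ a := by
      have := congrArg List.length hdrop; simp at this; omega
    rw [PySem.List.pyRange_one_eq_nil (by exact_mod_cast hle)]
    simp [sarcSpec]
  | [c] =>
    intro l a acc0 hdrop heven
    have hlen : l.length = a + 1 := by
      have := congrArg List.length hdrop; simp at this; omega
    have hget : l[a]? = some c := by
      have : (l.drop a)[0]? = l[a]? := by simp [List.getElem?_drop]
      rw [hdrop] at this; simpa using this.symm
    have hrange : PySem.List.pyRange (a : Int) ((l.length : Int)) 1 = [(a : Int)] := by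
      rw [hlen]; push_cast; exact PySem.List.pyRange_one_singleton a
    rw [hrange]
    have hmod : PySem.Int.mod (a : Int) 2 = 0 := by
      rw [PySem.Int.mod_eq_emod_of_pos (by norm_num)]; omega
    rw [List.foldl_cons, if_pos hmod, List.foldl_nil]
    simp [PySem.List.pyGetD_natCast, List.getD, hget, chars_lower_single, sarcSpec]
  | c :: d :: tt =>
    intro l a acc0 hdrop heven
    have hlen : l.length = a + tt.length + 2 := by
      have := congrArg List.length hdrop; simp at this; omega
    have hgc : l[a]? = some c := by
      have : (l.drop a)[0]? = l[a]? := by simp [List.getElem?_drop]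
      rw [hdrop] at this; simpa using this.symm
    have hgd : l[a+1]? = some d := by
      have : (l.drop a)[1]? = l[a+1]? := by simp [List.getElem?_drop]
      rw [hdrop] at this; simpa using this.symm
    have hdrop2 : l.drop (a + 2) = tt := by
      have h := congrArg (List.drop 2) hdrop
      rw [List.drop_drop] at h
      simpa using h
    have h1 : PySem.List.pyRange (a : Int) ((l.length : Int)) 1 = (a : Int) :: PySem.List.pyRange ((a : Int) + 1) ((l.length : Int)) 1 :=
      PySem.List.pyRange_one_cons (by omega)
    have h2 : PySem.List.pyRange ((a : Int) + 1) ((l.length : Int)) 1 = ((a : Int) + 1) :: PySem.List.pyRange ((a : Int) + 1 + 1) ((l.length : Int)) 1 :=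
      PySem.List.pyRange_one_cons (by omega)
    have hmod0 : PySem.Int.mod (a : Int) 2 = 0 := by
      rw [PySem.Int.mod_eq_emod_of_pos (by norm_num)]; omega
    have hmod1 : ¬ PySem.Int.mod ((a : Int) + 1) 2 = 0 := by
      rw [PySem.Int.mod_eq_emod_of_pos (by norm_num)]; omega
    have hc : PySem.List.pyGetD l (a : Int) ' ' = c := by
      rw [PySem.List.pyGetD_natCast]; simp [List.getD, hgc]
    have hd : PySem.List.pyGetD l ((a : Int) + 1) ' ' = d := by
      rw [show ((a : Int) + 1) = (((a + 1 : Nat)) : Int) by push_cast; ring, PySem.List.pyGetD_natCast]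
      simp [List.getD, hgd]
    rw [h1, h2, List.foldl_cons, List.foldl_cons, if_pos hmod0, if_neg hmod1, hc, hd,
      chars_lower_single, chars_upper_single]
    rw [show ((a : Int) + 1 + 1) = (((a + 2 : Nat)) : Int) by push_cast; ring]
    rw [a_flat tt l (a + 2) _ hdrop2 (by omega)]
    simp [sarcSpec]

theorem a_eq_spec (l : List Char) :
    (PySem.List.pyRange 0 (PySem.Chars.len l) 1).foldl
      (fun acc i =>
        if PySem.Int.mod i 2 = 0 then
          acc ++ PySem.Chars.lower [PySem.List.pyGetD l i ' ']
        else
          acc ++ PySem.Chars.upper [PySem.List.pyGetD l i ' '])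
      [] = sarcSpec l := by
  have h := a_flat l l 0 [] (by simp) (by omega)
  simpa using h

-- ===== VERDICT (by name: the statement is the Claim_ definition above) =====
theorem to_sarcastic_spec : Claim_equal_to_sarcastic := by
  intro txt _
  show _ = _
  unfold to_sarcastic to_sarcastic_alt
  simp only [slice?_even, slice?_odd, Option.getD_some, a_eq_spec, interleave_eq]
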